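-- pv_equiv track=rewrite | github.com/PaeP3nguin/advent-of-code-2017 | 3/3.py | spiral_layer
-- ===== SOURCE A (Python) =====
-- def spiral_layer(circumference, init_x, init_y):
--     for y in range(-circumference + 1, circumference + 1):
--         yield (init_x + circumference, init_y + y)
--     for x in range(circumference - 1, -circumference - 1, -1):
--         yield (init_x + x, init_y + circumference)
--     for y in range(circumference - 1, -circumference - 1, -1):
--         yield (init_x - circumference, init_y + y)
--     for x in range(-circumference + 1, circumference + 1):
--         yield (init_x + x, init_y - circumference)
-- ===== SOURCE B (Python) =====
-- def spiral_layer(circumference, init_x, init_y):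
--     # Closed form: the k-th point of the ring (k = 0..8c-1) is computed directly
--     # from k by two branchless clamped-ramp formulas, instead of four side loops.
--     c = circumference
--     for k in range(8 * c):
--         x = max(-c, min(c, max(3 * c - 1 - k, k - 7 * c + 1)))
--         y = max(-c, min(c, min(k - c + 1, 5 * c - 1 - k)))
--         yield (init_x + x, init_y + y)
-- ===== Notes on version B (the rewrite author's own statement) =====
-- stated objective: alternative
-- what changed: B replaces A's four per-side range loops by one single loop over the ring index k in range(8*c), computing each coordinate directly from k with two branchless clamped-ramp (min/max) closed-form formulas.
import Mathlib
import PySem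

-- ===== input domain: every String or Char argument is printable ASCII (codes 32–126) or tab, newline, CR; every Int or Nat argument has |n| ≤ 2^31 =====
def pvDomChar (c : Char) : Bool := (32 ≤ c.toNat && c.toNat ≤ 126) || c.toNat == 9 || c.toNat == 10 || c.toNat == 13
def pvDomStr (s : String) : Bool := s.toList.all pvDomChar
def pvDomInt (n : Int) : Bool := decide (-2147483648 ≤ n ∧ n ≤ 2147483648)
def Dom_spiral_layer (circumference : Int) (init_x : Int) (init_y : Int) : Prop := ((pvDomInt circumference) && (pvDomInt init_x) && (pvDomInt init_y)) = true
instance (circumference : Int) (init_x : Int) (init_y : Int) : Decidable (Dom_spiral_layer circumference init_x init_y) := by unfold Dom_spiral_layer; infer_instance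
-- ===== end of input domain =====

-- B replaces A's four per-side loops by a single loop over the ring index k in
-- range(8*c), computing each coordinate from k with branchless clamped-ramp
-- (min/max) closed-form formulas: an alternative algorithm, same cost.

-- ===== PORT A =====
def spiral_layer (circumference : Int) (init_x : Int) (init_y : Int) : List (Int × Int) :=
  (PySem.List.pyRange (-circumference + 1) (circumference + 1) 1).map
      (fun y => (init_x + circumference, init_y + y)) ++
  (PySem.List.pyRange (circumference - 1) (-circumference - 1) (-1)).map
      (fun x => (init_x + x, init_y + circumference)) ++
  (PySem.List.pyRange (circumference - 1) (-circumference - 1) (-1)).map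
      (fun y => (init_x - circumference, init_y + y)) ++
  (PySem.List.pyRange (-circumference + 1) (circumference + 1) 1).map
      (fun x => (init_x + x, init_y - circumference))

-- ===== PORT B =====
def spiral_layer_alt (circumference : Int) (init_x : Int) (init_y : Int) : List (Int × Int) :=
  (PySem.List.pyRange 0 (8 * circumference) 1).map (fun k =>
    (init_x + max (-circumference) (min circumference
        (max (3 * circumference - 1 - k) (k - 7 * circumference + 1))),
     init_y + max (-circumference) (min circumference
        (min (k - circumference + 1) (5 * circumference - 1 - k)))))

-- ===== PRECONDITION & SPEC =====
def Spec_spiral_layer (circumference : Int) (init_x : Int) (init_y : Int) (out : List (Int × Int)) : Prop := out = spiral_layer_alt circumference init_x init_y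
instance (circumference : Int) (init_x : Int) (init_y : Int) (out : List (Int × Int)) : Decidable (Spec_spiral_layer circumference init_x init_y out) := by unfold Spec_spiral_layer; infer_instance

-- ===== CLAIM (what is proved, stated in full; the proofs are below) =====
def Claim_equal_spiral_layer : Prop := ∀ (circumference : Int) (init_x : Int) (init_y : Int), Dom_spiral_layer circumference init_x init_y → Spec_spiral_layer circumference init_x init_y (spiral_layer circumference init_x init_y)

-- ===== LEMMAS AND PROOFS =====

theorem spiral_layer_spec_aux (c ix iy : Int) :
    spiral_layer c ix iy = spiral_layer_alt c ix iy := by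
  unfold spiral_layer spiral_layer_alt
  by_cases hc : c ≤ 0
  · rw [PySem.List.pyRange_one_eq_nil (by omega), PySem.List.pyRange_neg_one_eq_nil (by omega),
        PySem.List.pyRange_one_eq_nil (by omega)]
    simp
  · rw [PySem.List.pyRange_one_append 0 (2 * c) (8 * c) (by omega) (by omega),
        PySem.List.pyRange_one_append (2 * c) (4 * c) (8 * c) (by omega) (by omega),
        PySem.List.pyRange_one_append (4 * c) (6 * c) (8 * c) (by omega) (by omega)]
    simp only [List.map_append, List.append_assoc]
    rw [PySem.List.pyRange_one (-c + 1) (c + 1), PySem.List.pyRange_neg_one (c - 1) (-c - 1),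
        PySem.List.pyRange_one 0 (2 * c), PySem.List.pyRange_one (2 * c) (4 * c),
        PySem.List.pyRange_one (4 * c) (6 * c), PySem.List.pyRange_one (6 * c) (8 * c)]
    have e1 : (c + 1 - (-c + 1)).toNat = (2 * c).toNat := by omega
    have e2 : (c - 1 - (-c - 1)).toNat = (2 * c).toNat := by omega
    have e3 : (2 * c - 0).toNat = (2 * c).toNat := by omega
    have e4 : (4 * c - 2 * c).toNat = (2 * c).toNat := by omega
    have e5 : (6 * c - 4 * c).toNat = (2 * c).toNat := by omega
    have e6 : (8 * c - 6 * c).toNat = (2 * c).toNat := by omega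
    rw [e1, e2, e3, e4, e5, e6]
    simp only [List.map_map]
    congr 1
    · refine List.map_congr_left fun k hk => ?_
      rw [List.mem_range] at hk
      have hk' : (k : Int) < 2 * c := by omega
      simp only [Function.comp, Prod.mk.injEq]
      constructor <;> omega
    congr 1
    · refine List.map_congr_left fun k hk => ?_
      rw [List.mem_range] at hk
      have hk' : (k : Int) < 2 * c := by omega
      simp only [Function.comp, Prod.mk.injEq]
      constructor <;> omega
    congr 1
    · refine List.map_congr_left fun k hk => ?_
      rw [List.mem_range] at hk
      have hk' : (k : Int) < 2 * c := by omega
      simp only [Function.comp, Prod.mk.injEq]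
      constructor <;> omega
    · refine List.map_congr_left fun k hk => ?_
      rw [List.mem_range] at hk
      have hk' : (k : Int) < 2 * c := by omega
      simp only [Function.comp, Prod.mk.injEq]
      constructor <;> omega

-- ===== VERDICT (by name: the statement is the Claim_ definition above) =====
theorem spiral_layer_spec : Claim_equal_spiral_layer := by
  intro c ix iy _
  exact spiral_layer_spec_aux c ix iy
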